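-- pv_equiv track=rewrite | github.com/dcshiller/please | please.py | extract_back_ticks
-- ===== SOURCE A (Python) =====
-- def extract_back_ticks(string):
--     if '```' not in string:
--         return string
--
--     code_block = False
--     code = ''
--     lines = string.split('\n')
--     for line in lines:
--         if line.startswith('```'):
--             code_block = True
--         elif code_block:
--             if line.startswith('```'):
--                 code_block = False
--                 break
--             else:
--                 code += line + '\n'
--     return code.strip()
-- ===== SOURCE B (Python) =====
-- def extract_back_ticks(string):
--     if '```' not in string:
--         return string
--     lines = string.split('\n')
--     for i, line in enumerate(lines):
--         if line.startswith('```'):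
--             kept = [l for l in lines[i + 1:] if not l.startswith('```')]
--             return '\n'.join(kept).strip()
--     return ''
-- ===== Notes on version B (the rewrite author's own statement) =====
-- stated objective: simpler
-- what changed: Replaces A's stateful code_block-flag accumulation loop (with its unreachable break) by locating the first fence line and then joining the filtered tail in a separate pass.
import Mathlib
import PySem

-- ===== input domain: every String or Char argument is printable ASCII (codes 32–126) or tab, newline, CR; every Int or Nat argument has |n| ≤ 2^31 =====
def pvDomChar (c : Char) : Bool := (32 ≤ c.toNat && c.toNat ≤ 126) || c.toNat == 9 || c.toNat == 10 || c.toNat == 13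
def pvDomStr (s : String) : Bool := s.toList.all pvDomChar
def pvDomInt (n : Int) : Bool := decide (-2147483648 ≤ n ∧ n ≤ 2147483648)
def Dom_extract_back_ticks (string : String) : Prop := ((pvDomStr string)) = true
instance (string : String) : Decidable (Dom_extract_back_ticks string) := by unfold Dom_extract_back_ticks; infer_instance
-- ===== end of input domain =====

-- B locates the first fence line and joins the filtered tail in a separate pass, instead of
-- A's stateful code_block-flag accumulation loop; same values everywhere (objective: simpler).

-- ===== PORT A =====
def pvFence : List Char := ['`', '`', '`']

-- the for-loop of A: state = (code_block, code); the inner '```' branch (break) is kept literally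
def pvLoopA : List (List Char) → Bool → List Char → List Char
  | [], _, code => code
  | l :: rest, cb, code =>
    if PySem.Chars.startswith l pvFence then pvLoopA rest true code
    else if cb then
      if PySem.Chars.startswith l pvFence then code   -- code_block = False; break
      else pvLoopA rest cb (code ++ l ++ ['\n'])
    else pvLoopA rest cb code

def extract_back_ticks (string : String) : String :=
  if PySem.Str.isIn "```" string then
    let lines := PySem.Chars.splitOn string.toList ['\n']
    String.ofList (PySem.Chars.strip (pvLoopA lines false []))
  else string

-- ===== PORT B =====
-- Source B's enumerate loop: returns the tail lines[i+1:] after the first fence line, if any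
def pvFindAfterFence : List (List Char) → Option (List (List Char))
  | [] => none
  | l :: rest =>
    if PySem.Chars.startswith l pvFence then some rest else pvFindAfterFence rest

def extract_back_ticks_alt (string : String) : String :=
  if PySem.Str.isIn "```" string then
    let lines := PySem.Chars.splitOn string.toList ['\n']
    match pvFindAfterFence lines with
    | none => ""
    | some tail =>
        String.ofList (PySem.Chars.strip (PySem.Chars.join ['\n']
          (tail.filter (fun l => !PySem.Chars.startswith l pvFence))))
  else string

-- ===== PRECONDITION & SPEC =====
def Spec_extract_back_ticks (string : String) (out : String) : Prop := out = extract_back_ticks_alt string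
instance (string : String) (out : String) : Decidable (Spec_extract_back_ticks string out) := by unfold Spec_extract_back_ticks; infer_instance

-- ===== CLAIM (what is proved, stated in full; the proofs are below) =====
def Claim_equal_extract_back_ticks : Prop := ∀ (string : String), Dom_extract_back_ticks string → Spec_extract_back_ticks string (extract_back_ticks string)

-- ===== LEMMAS AND PROOFS =====

-- A's loop before any fence line is a search for the first fence line
theorem pvLoopA_false (ls : List (List Char)) (code : List Char) :
    pvLoopA ls false code =
      (match pvFindAfterFence ls with
        | none => code
        | some t => pvLoopA t true code) := by
  induction ls with
  | nil => rfl
  | cons l rest ih =>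
    by_cases h : PySem.Chars.startswith l pvFence
    · simp [pvLoopA, pvFindAfterFence, h]
    · simp [pvLoopA, pvFindAfterFence, h, ih]

-- after the first fence the flag stays true, so A accumulates every non-fence line + '\n'
theorem pvLoopA_true (ls : List (List Char)) (code : List Char) :
    pvLoopA ls true code =
      code ++ ((ls.filter (fun l => !PySem.Chars.startswith l pvFence)).map (· ++ ['\n'])).flatten := by
  induction ls generalizing code with
  | nil => simp [pvLoopA]
  | cons l rest ih =>
    by_cases h : PySem.Chars.startswith l pvFence
    · simp [pvLoopA, h, ih]
    · simp [pvLoopA, h, ih]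

theorem strip_append_newline (cs : List Char) :
    PySem.Chars.strip (cs ++ ['\n']) = PySem.Chars.strip cs := by
  have hnl : PySem.Chars.isspace '\n' = true := by decide
  simp only [PySem.Chars.strip, PySem.Chars.lstrip, PySem.Chars.rstrip, List.dropWhile_append]
  by_cases h : (List.dropWhile PySem.Chars.isspace cs).isEmpty
  · rw [List.isEmpty_iff] at h
    simp [h, hnl]
  · simp [h, hnl]

-- '\n'-terminated concatenation and '\n'-join agree up to a trailing '\n', which strip removes
theorem strip_flatten_eq_strip_join (ks : List (List Char)) :
    PySem.Chars.strip ((ks.map (· ++ ['\n'])).flatten) =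
      PySem.Chars.strip (PySem.Chars.join ['\n'] ks) := by
  have key : ∀ ks : List (List Char), ks ≠ [] →
      (ks.map (· ++ ['\n'])).flatten = List.intercalate ['\n'] ks ++ ['\n'] := by
    intro ks
    induction ks with
    | nil => simp
    | cons k rest ih =>
      intro _
      cases rest with
      | nil => simp [List.intercalate]
      | cons r rs =>
        have h2 := ih (by simp)
        have h3 : ['\n'].intercalate (k :: r :: rs) = k ++ '\n' :: ['\n'].intercalate (r :: rs) := by
          simp [List.intercalate]
        rw [h3]
        simp only [List.map_cons, List.flatten_cons] at h2 ⊢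
        simp [h2]
  cases hks : ks with
  | nil => rfl
  | cons k rest =>
    rw [← hks, key ks (by simp [hks]), strip_append_newline]
    rfl

-- ===== VERDICT (by name: the statement is the Claim_ definition above) =====
theorem extract_back_ticks_spec : Claim_equal_extract_back_ticks := by
  intro s _
  unfold Spec_extract_back_ticks extract_back_ticks extract_back_ticks_alt
  by_cases h : PySem.Str.isIn "```" s
  · simp only [h, if_pos]
    rw [pvLoopA_false]
    cases hf : pvFindAfterFence (PySem.Chars.splitOn s.toList ['\n']) with
    | none => rfl
    | some tail =>
      simp only [pvLoopA_true, List.nil_append, strip_flatten_eq_strip_join]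
  · simp only [PySem.Str.isIn_eq] at h
    have e : "```".toList = ['`', '`', '`'] := rfl
    rw [e] at h
    simp [h]
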